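-- pv_equiv track=rewrite | github.com/jamesrehabstudio/beastlords | maps/MapFiller.py | makebig
-- ===== SOURCE A (Python) =====
-- def makebig(indata):
-- 	map = indata[0]
-- 	mapWidth = indata[1]
-- 	width = mapWidth * 16
-- 	out = [0] * (len(map) * 16 * 15)
--
-- 	i = 0
-- 	for t in map:
-- 		index = int((i%mapWidth) + int(i/mapWidth)*width)
-- 		out[index] = t
-- 		i+=1
--
-- 	return out
-- ===== SOURCE B (Python) =====
-- def makebig(indata):
--     tiles = indata[0]
--     mapWidth = indata[1]
--     width = mapWidth * 16
--     n = len(tiles)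
--     return [
--         tiles[(j // width) * mapWidth + j % width]
--         if j % width < mapWidth and (j // width) * mapWidth + j % width < n
--         else 0
--         for j in range(n * 16 * 15)
--     ]
-- ===== Notes on version B (the rewrite author's own statement) =====
-- stated objective: alternative
-- what changed: B computes each output cell directly by a gather comprehension (decode j into row/column and read the tile, else 0) instead of A's preallocated zero buffer with a scatter loop assigning each tile at a computed index; Pre_ excludes nonpositive mapWidth with a nonempty map, where A either raises ZeroDivisionError (mapWidth==0) or returns a scatter produced by accidental negative-index wraparound (mapWidth<0).
import Mathlib
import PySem

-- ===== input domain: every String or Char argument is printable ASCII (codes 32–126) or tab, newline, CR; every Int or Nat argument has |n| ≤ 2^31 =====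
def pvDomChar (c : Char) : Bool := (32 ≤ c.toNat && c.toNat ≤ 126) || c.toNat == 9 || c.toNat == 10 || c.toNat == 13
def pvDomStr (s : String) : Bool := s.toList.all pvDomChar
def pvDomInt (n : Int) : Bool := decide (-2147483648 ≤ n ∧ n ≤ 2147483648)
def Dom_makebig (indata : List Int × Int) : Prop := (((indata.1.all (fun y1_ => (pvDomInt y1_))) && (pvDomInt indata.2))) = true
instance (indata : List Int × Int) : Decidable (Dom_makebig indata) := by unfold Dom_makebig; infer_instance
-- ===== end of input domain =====

-- B replaces A's preallocate-and-scatter loop by a direct gather comprehension over the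
-- output positions (alternative decomposition, same cost).

-- ===== PORT A =====
-- Python's `out[index] = t` is ported with pySetD (exact when 0 ≤ index < len(out), which
-- holds on Pre_); `int(i/mapWidth)` is ported as truncating division (exact while the index
-- stays below 2^52, which covers the stated domain).
def makebigLoop (mapWidth width : Int) : List Int → Int → List Int → List Int
  | [], _, out => out
  | t :: ts, i, out =>
      makebigLoop mapWidth width ts (i + 1)
        (PySem.List.pySetD out
          (PySem.Int.mod i mapWidth + PySem.Int.truncdiv i mapWidth * width) t)

def makebig (indata : List Int × Int) : List Int :=
  let map := indata.1
  let mapWidth := indata.2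
  let width := mapWidth * 16
  let out := List.replicate (map.length * 16 * 15) (0 : Int)
  makebigLoop mapWidth width map 0 out

-- ===== PORT B =====
-- `tiles[k]` is ported with pyGetD (exact because the guard gives 0 ≤ k < len(tiles) on Pre_).
def makebig_alt (indata : List Int × Int) : List Int :=
  let tiles := indata.1
  let mapWidth := indata.2
  let width := mapWidth * 16
  let n : Int := tiles.length
  (PySem.List.pyRange 0 (n * 16 * 15) 1).map (fun j =>
    if PySem.Int.mod j width < mapWidth ∧
        PySem.Int.floordiv j width * mapWidth + PySem.Int.mod j width < n then
      PySem.List.pyGetD tiles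
        (PySem.Int.floordiv j width * mapWidth + PySem.Int.mod j width) 0
    else 0)

-- ===== PRECONDITION & SPEC =====
-- Pre_ excludes nonpositive mapWidth with a nonempty map: there A raises ZeroDivisionError
-- (mapWidth == 0) or returns a scatter produced by Python's accidental negative-index
-- wraparound (mapWidth < 0), neither of which is the function's intended domain.
def Pre_makebig (indata : List Int × Int) : Prop := 1 ≤ indata.2 ∨ indata.1 = []
instance (indata : List Int × Int) : Decidable (Pre_makebig indata) := by unfold Pre_makebig; infer_instance
def pvWitness_makebig : (List Int × Int) := ([1, 2, 3], 2)
def Spec_makebig (indata : List Int × Int) (out : List Int) : Prop := out = makebig_alt indata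
instance (indata : List Int × Int) (out : List Int) : Decidable (Spec_makebig indata out) := by unfold Spec_makebig; infer_instance

-- ===== CLAIM (what is proved, stated in full; the proofs are below) =====
def Claim_equal_makebig : Prop := ∀ (indata : List Int × Int), Dom_makebig indata → Pre_makebig indata → Spec_makebig indata (makebig indata)

-- ===== LEMMAS AND PROOFS =====

-- index where A's loop writes tile number p (Nat form, for map width wN ≥ 1)
def encIdx (wN p : Nat) : Nat := p % wN + p / wN * (wN * 16)
-- tile number read back from output position j
def decIdx (wN j : Nat) : Nat := j / (wN * 16) * wN + j % (wN * 16)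

lemma encIdx_mod (wN p : Nat) (hw : 1 ≤ wN) : encIdx wN p % (wN * 16) = p % wN := by
  unfold encIdx
  rw [Nat.add_mul_mod_self_right]
  exact Nat.mod_eq_of_lt (lt_of_lt_of_le (Nat.mod_lt _ (by omega)) (by omega))

lemma encIdx_div (wN p : Nat) (hw : 1 ≤ wN) : encIdx wN p / (wN * 16) = p / wN := by
  unfold encIdx
  rw [Nat.add_mul_div_right _ _ (by omega : 0 < wN * 16),
      Nat.div_eq_of_lt (lt_of_lt_of_le (Nat.mod_lt _ (by omega)) (by omega))]
  omega

lemma decIdx_encIdx (wN p : Nat) (hw : 1 ≤ wN) : decIdx wN (encIdx wN p) = p := by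
  unfold decIdx
  rw [encIdx_mod wN p hw, encIdx_div wN p hw]
  have h := Nat.div_add_mod p wN
  have h2 : p / wN * wN = wN * (p / wN) := Nat.mul_comm _ _
  omega

lemma encIdx_decIdx (wN j : Nat) (hw : 1 ≤ wN) (hr : j % (wN * 16) < wN) :
    encIdx wN (decIdx wN j) = j := by
  unfold encIdx decIdx
  have h1 : (j / (wN * 16) * wN + j % (wN * 16)) % wN = j % (wN * 16) := by
    rw [Nat.mul_comm (j / (wN * 16)) wN, Nat.mul_add_mod]
    exact Nat.mod_eq_of_lt hr
  have h2 : (j / (wN * 16) * wN + j % (wN * 16)) / wN = j / (wN * 16) := by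
    rw [Nat.mul_comm (j / (wN * 16)) wN, Nat.mul_add_div (by omega),
        Nat.div_eq_of_lt hr, Nat.add_zero]
  rw [h1, h2]
  exact Nat.mod_add_div' j (wN * 16)

lemma encIdx_lt (wN n m : Nat) (hw : 1 ≤ wN) (hm : m < n) : encIdx wN m < n * 16 * 15 := by
  unfold encIdx
  have hd := Nat.div_add_mod m wN
  have hr : m % wN < wN := Nat.mod_lt _ (by omega)
  have h2 : m / wN * (wN * 16) = 16 * (wN * (m / wN)) := by ring
  rw [h2]
  have hP : wN * (m / wN) ≤ m := by omega
  omega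

lemma makebigLoop_getElem? (wN : Nat) (hw : 1 ≤ wN) (ts : List Int) :
    ∀ (i : Nat) (out : List Int),
      (∀ m : Nat, m < ts.length → encIdx wN (i + m) < out.length) →
      ∀ j : Nat,
        (makebigLoop (wN : Int) ((wN : Int) * 16) ts ((i : Nat) : Int) out)[j]? =
          if j % (wN * 16) < wN ∧ i ≤ decIdx wN j ∧ decIdx wN j < i + ts.length
          then ts[decIdx wN j - i]?
          else out[j]? := by
  induction ts with
  | nil =>
    intro i out _ j
    simp only [makebigLoop, List.length_nil]
    split_ifs with h
    · omega
    · rfl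
  | cons t ts ih =>
    intro i out hb j
    have hidx : PySem.Int.mod ((i : Nat) : Int) (wN : Int) +
        PySem.Int.truncdiv ((i : Nat) : Int) (wN : Int) * ((wN : Int) * 16) =
        ((encIdx wN i : Nat) : Int) := by
      rw [PySem.Int.mod_natCast]
      rw [show PySem.Int.truncdiv ((i : Nat) : Int) (wN : Int) = ((i / wN : Nat) : Int) from rfl]
      unfold encIdx
      push_cast
      ring
    have hstep : makebigLoop (wN : Int) ((wN : Int) * 16) (t :: ts) ((i : Nat) : Int) out =
        makebigLoop (wN : Int) ((wN : Int) * 16) ts (((i + 1 : Nat) : Nat) : Int)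
          (out.set (encIdx wN i) t) := by
      simp only [makebigLoop]
      rw [hidx, PySem.List.pySetD_natCast]
      norm_num
    rw [hstep]
    have hb' : ∀ m : Nat, m < ts.length → encIdx wN ((i + 1) + m) < (out.set (encIdx wN i) t).length := by
      intro m hm
      rw [List.length_set]
      have := hb (m + 1) (by simpa using Nat.succ_lt_succ hm)
      have heq : i + (m + 1) = (i + 1) + m := by omega
      rwa [heq] at this
    rw [ih (i + 1) _ hb' j]
    have hneOfDec : decIdx wN j ≠ i → encIdx wN i ≠ j := by
      intro hd h
      exact hd (by rw [← h, decIdx_encIdx wN i hw])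
    by_cases hr : j % (wN * 16) < wN
    · by_cases hd1 : i + 1 ≤ decIdx wN j
      · by_cases hlt : decIdx wN j < i + 1 + ts.length
        · rw [if_pos ⟨hr, hd1, hlt⟩,
              if_pos ⟨hr, by omega, by simp only [List.length_cons]; omega⟩]
          have hsub : decIdx wN j - i = (decIdx wN j - (i + 1)) + 1 := by omega
          rw [hsub]
          simp
        · rw [if_neg (by tauto), if_neg (by simp only [List.length_cons]; omega),
              List.getElem?_set_ne (hneOfDec (by omega))]
      · by_cases hdi : decIdx wN j = i
        · have hj : j = encIdx wN i := by
            have h := encIdx_decIdx wN j hw hr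
            rw [hdi] at h
            omega
          rw [if_neg (by omega)]
          have hlen : encIdx wN i < out.length := by
            have := hb 0 (by simp)
            simpa using this
          have hset : (out.set (encIdx wN i) t)[j]? = some t := by
            rw [hj]; exact List.getElem?_set_self hlen
          rw [hset, if_pos ⟨hr, by omega, by simp only [List.length_cons]; omega⟩, hdi]
          simp
        · rw [if_neg (by omega), if_neg (by simp only [List.length_cons]; omega),
              List.getElem?_set_ne (hneOfDec hdi)]
    · have hne : encIdx wN i ≠ j := by
        intro h
        have hm := encIdx_mod wN i hw
        rw [h] at hm
        exact hr (by rw [hm]; exact Nat.mod_lt _ (by omega))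
      rw [if_neg (by tauto), if_neg (by tauto), List.getElem?_set_ne hne]

-- ===== VERDICT (by name: the statement is the Claim_ definition above) =====
theorem makebig_spec : Claim_equal_makebig := by
  intro indata _ hpre
  unfold Spec_makebig
  obtain ⟨tiles, w⟩ := indata
  rcases hpre with hw | hnil
  · have hwc : ((w.toNat : Nat) : Int) = w := Int.toNat_of_nonneg (by omega)
    have hw1 : 1 ≤ w.toNat := by omega
    have hB : ∀ j : Nat, (makebig_alt (tiles, w))[j]? =
        if j < tiles.length * 16 * 15 then
          some (if j % (w.toNat * 16) < w.toNat ∧ decIdx w.toNat j < tiles.length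
                then tiles.getD (decIdx w.toNat j) 0 else 0)
        else none := by
      intro j
      simp only [makebig_alt]
      rw [← hwc]
      simp only [Int.toNat_natCast]
      rw [show ((w.toNat : Int) * 16) = ((w.toNat * 16 : Nat) : Int) from by push_cast; ring,
          show ((tiles.length : Int) * 16 * 15) = ((tiles.length * 16 * 15 : Nat) : Int) from by
            push_cast; ring]
      rw [List.getElem?_map, PySem.List.getElem?_pyRange_one]
      by_cases hj : j < tiles.length * 16 * 15
      · rw [if_pos (by omega), if_pos hj]
        simp only [Option.map_some, zero_add]
        congr 1
        rw [PySem.Int.mod_natCast, PySem.Int.floordiv_natCast]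
        rw [show ((j / (w.toNat * 16) : Nat) : Int) * ((w.toNat : Nat) : Int) +
              ((j % (w.toNat * 16) : Nat) : Int) = ((decIdx w.toNat j : Nat) : Int) from by
            unfold decIdx; push_cast; ring]
        by_cases hc : j % (w.toNat * 16) < w.toNat ∧ decIdx w.toNat j < tiles.length
        · rw [if_pos (by exact_mod_cast hc), if_pos hc, PySem.List.pyGetD_natCast]
        · rw [if_neg (by exact_mod_cast hc), if_neg hc]
      · rw [if_neg (by omega), if_neg hj, Option.map_none]
    apply List.ext_getElem?
    intro j
    have hb : ∀ m : Nat, m < tiles.length →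
        encIdx w.toNat (0 + m) < (List.replicate (tiles.length * 16 * 15) (0 : Int)).length := by
      intro m hm
      rw [List.length_replicate, Nat.zero_add]
      exact encIdx_lt w.toNat tiles.length m hw1 hm
    have hA : makebig (tiles, w) =
        makebigLoop ((w.toNat : Nat) : Int) (((w.toNat : Nat) : Int) * 16) tiles
          (((0 : Nat) : Nat) : Int) (List.replicate (tiles.length * 16 * 15) 0) := by
      simp only [makebig, hwc]
      norm_num
    rw [hA, makebigLoop_getElem? w.toNat hw1 tiles 0 _ hb j, hB j]
    by_cases hj : j < tiles.length * 16 * 15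
    · rw [if_pos hj]
      by_cases hc : j % (w.toNat * 16) < w.toNat ∧ decIdx w.toNat j < tiles.length
      · rw [if_pos hc, if_pos ⟨hc.1, Nat.zero_le _, by omega⟩, Nat.sub_zero,
            List.getElem?_eq_getElem (by exact hc.2), List.getD_eq_getElem tiles 0 hc.2]
      · rw [if_neg hc, if_neg (by intro h; exact hc ⟨h.1, by omega⟩)]
        simp [hj]
    · rw [if_neg hj]
      have hcf : ¬(j % (w.toNat * 16) < w.toNat ∧ 0 ≤ decIdx w.toNat j ∧
          decIdx w.toNat j < 0 + tiles.length) := by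
        rintro ⟨h1, _, h3⟩
        have hlt := encIdx_lt w.toNat tiles.length (decIdx w.toNat j) hw1 (by omega)
        rw [encIdx_decIdx w.toNat j hw1 h1] at hlt
        omega
      rw [if_neg hcf]
      exact List.getElem?_eq_none (by rw [List.length_replicate]; omega)
  · subst hnil
    simp [makebig, makebig_alt, makebigLoop, PySem.List.pyRange_one_eq_nil]
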